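-- pv_equiv track=rewrite | github.com/jason-lui/A00930386_1510_labs | Lab10/question_8.py | max_bars
-- ===== SOURCE A (Python) =====
-- def max_bars(lower_bound, upper_bound):
--     """
--
--     :param lower_bound:
--     :param upper_bound:
--     :return:
--     """
--     bar_dict = {0: 6, 1: 2, 2: 5, 3: 5, 4: 4, 5: 5, 6: 6, 7: 3, 8: 7, 9: 6, 10: 8, 11: 4, 12: 7}
--     res = []
--     max_value = 0
--
--     for i in range(lower_bound, upper_bound):
--         if bar_dict[i] > max_value:
--             max_value = bar_dict[i]
--
--     for i in range(lower_bound, upper_bound):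
--         if bar_dict[i] == max_value:
--             res.append(i)
--
--     return res
-- ===== SOURCE B (Python) =====
-- def max_bars(lower_bound, upper_bound):
--     bar_dict = {0: 6, 1: 2, 2: 5, 3: 5, 4: 4, 5: 5, 6: 6, 7: 3, 8: 7, 9: 6, 10: 8, 11: 4, 12: 7}
--     max_value = 0
--     res = []
--     for i in range(lower_bound, upper_bound):
--         v = bar_dict[i]
--         if v > max_value:
--             max_value = v
--             res = [i]
--         elif v == max_value:
--             res.append(i)
--     return res
-- ===== Notes on version B (the rewrite author's own statement) =====
-- stated objective: alternative
-- what changed: B replaces A's two full passes (find the max, then collect indices equal to it) by a single pass that resets the result list whenever a new maximum appears, so the range is traversed once instead of twice.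
import Mathlib
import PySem

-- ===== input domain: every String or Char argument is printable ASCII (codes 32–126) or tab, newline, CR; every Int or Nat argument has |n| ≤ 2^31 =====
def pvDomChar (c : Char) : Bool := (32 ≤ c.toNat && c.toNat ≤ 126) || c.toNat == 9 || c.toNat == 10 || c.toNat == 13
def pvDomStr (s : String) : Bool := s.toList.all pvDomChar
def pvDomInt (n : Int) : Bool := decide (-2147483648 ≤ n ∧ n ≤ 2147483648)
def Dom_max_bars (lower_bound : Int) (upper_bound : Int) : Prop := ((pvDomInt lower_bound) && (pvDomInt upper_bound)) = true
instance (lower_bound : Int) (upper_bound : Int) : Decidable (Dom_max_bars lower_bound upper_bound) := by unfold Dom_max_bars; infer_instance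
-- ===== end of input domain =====

-- B merges A's two passes over the range into one reset-on-new-max pass (alternative decomposition, same cost).


-- ===== PORT A =====
-- bar_dict; 'bar_dict[i]' raises KeyError for i outside 0..12 — those inputs are excluded by Pre_max_bars,
-- so 'getD i 0' is exact on every admitted input.
def barDict : PySem.Dict Int Int :=
  PySem.Dict.ofList [(0, 6), (1, 2), (2, 5), (3, 5), (4, 4), (5, 5), (6, 6), (7, 3), (8, 7), (9, 6), (10, 8), (11, 4), (12, 7)]

def max_bars (lower_bound : Int) (upper_bound : Int) : List Int :=
  let r := PySem.List.pyRange lower_bound upper_bound 1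
  -- first pass: find the maximum value
  let max_value : Int :=
    r.foldl (fun m i => if PySem.Dict.getD barDict i 0 > m then PySem.Dict.getD barDict i 0 else m) 0
  -- second pass: collect indices with that value
  r.foldl (fun res i => if PySem.Dict.getD barDict i 0 = max_value then res ++ [i] else res) []

-- ===== PORT B =====
def max_bars_alt (lower_bound : Int) (upper_bound : Int) : List Int :=
  ((PySem.List.pyRange lower_bound upper_bound 1).foldl
    (fun (st : Int × List Int) i =>
      let v := PySem.Dict.getD barDict i 0
      if v > st.1 then (v, [i])
      else if v = st.1 then (st.1, st.2 ++ [i])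
      else st)
    (0, [])).2

-- ===== PRECONDITION & SPEC =====
-- Pre_ excludes exactly the inputs where A raises KeyError: a nonempty range reaching a key outside 0..12.
def Pre_max_bars (lower_bound : Int) (upper_bound : Int) : Prop :=
  upper_bound ≤ lower_bound ∨ (0 ≤ lower_bound ∧ upper_bound ≤ 13)
instance (lower_bound : Int) (upper_bound : Int) : Decidable (Pre_max_bars lower_bound upper_bound) := by
  unfold Pre_max_bars; infer_instance

def pvWitness_max_bars : Int × Int := (2, 11)

def Spec_max_bars (lower_bound : Int) (upper_bound : Int) (out : List Int) : Prop := out = max_bars_alt lower_bound upper_bound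
instance (lower_bound : Int) (upper_bound : Int) (out : List Int) : Decidable (Spec_max_bars lower_bound upper_bound out) := by unfold Spec_max_bars; infer_instance

-- ===== CLAIM (what is proved, stated in full; the proofs are below) =====
def Claim_equal_max_bars : Prop := ∀ (lower_bound : Int) (upper_bound : Int), Dom_max_bars lower_bound upper_bound → Pre_max_bars lower_bound upper_bound → Spec_max_bars lower_bound upper_bound (max_bars lower_bound upper_bound)

-- ===== LEMMAS AND PROOFS =====
theorem pyRange_empty_of_le (a b : Int) (h : b ≤ a) : PySem.List.pyRange a b 1 = [] := by
  rw [PySem.List.pyRange_one]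
  have : (b - a).toNat = 0 := by omega
  simp [this]

-- ===== VERDICT (by name: the statement is the Claim_ definition above) =====
theorem max_bars_spec : Claim_equal_max_bars := by
  intro l u _ hpre
  unfold Spec_max_bars
  rcases hpre with h | ⟨hl, hu⟩
  · simp [max_bars, max_bars_alt, pyRange_empty_of_le l u h]
  · by_cases hlt : l < u
    · have hl' : l ≤ 12 := by omega
      interval_cases l <;> interval_cases u <;> rfl
    · simp [max_bars, max_bars_alt, pyRange_empty_of_le l u (by omega)]
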